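-- pv_equiv track=rewrite | github.com/nguyenrtm/DDI-KT-2024 | bc5_2024/text/dependency_parsing/path_processer.py | get_position_embedding_given_ent
-- ===== SOURCE A (Python) =====
-- def get_position_embedding_given_ent(
--                                      ent_start: int,
--                                      ent_end: int,
--                                      text_length: int):
--     '''
--     Given entity index, get position embedding of sentence
--     '''
--     lst = []
--     count_bef = ent_start
--     count_in = ent_end - ent_start
--     count_aft = text_length - ent_end - 1
--
--     for i in range(count_bef, 0, -1):
--         lst.append(-i)
--
--     for i in range(count_in + 1):
--         lst.append(0)
--
--     for i in range(1, count_aft + 1):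
--         lst.append(i)
--     return lst
-- ===== SOURCE B (Python) =====
-- def get_position_embedding_given_ent(ent_start: int, ent_end: int, text_length: int):
--     nbef = max(0, ent_start)
--     nmid = max(0, ent_end - ent_start + 1)
--     naft = max(0, text_length - ent_end - 1)
--     return [j - nbef if j < nbef else (0 if j < nbef + nmid else j - nbef - nmid + 1)
--             for j in range(nbef + nmid + naft)]
-- ===== Notes on version B (the rewrite author's own statement) =====
-- stated objective: alternative
-- what changed: Replaces A's three separate append loops by computing the three segment sizes up front and emitting each element from a single comprehension over the total index range with a branch formula.
import Mathlib
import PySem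

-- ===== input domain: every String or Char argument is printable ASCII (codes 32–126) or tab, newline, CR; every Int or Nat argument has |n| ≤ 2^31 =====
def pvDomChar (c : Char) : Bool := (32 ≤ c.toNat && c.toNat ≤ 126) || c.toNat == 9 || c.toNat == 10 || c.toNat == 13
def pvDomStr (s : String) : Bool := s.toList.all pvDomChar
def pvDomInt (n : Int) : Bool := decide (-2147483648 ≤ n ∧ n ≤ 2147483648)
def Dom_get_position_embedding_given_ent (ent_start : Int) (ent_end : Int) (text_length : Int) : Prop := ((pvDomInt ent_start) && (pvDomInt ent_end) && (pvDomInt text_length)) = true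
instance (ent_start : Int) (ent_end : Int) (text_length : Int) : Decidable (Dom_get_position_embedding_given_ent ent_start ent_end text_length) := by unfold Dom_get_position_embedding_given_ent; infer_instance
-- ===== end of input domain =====

-- B computes the three segment sizes first and builds the list in one pass with a branch formula (alternative decomposition, same cost).


-- ===== PORT A =====
def get_position_embedding_given_ent (ent_start : Int) (ent_end : Int) (text_length : Int) : List Int :=
  let lst : List Int := []
  let count_bef := ent_start
  let count_in := ent_end - ent_start
  let count_aft := text_length - ent_end - 1
  let lst := (PySem.List.pyRange count_bef 0 (-1)).foldl (fun acc i => acc ++ [-i]) lst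
  let lst := (PySem.List.pyRange 0 (count_in + 1) 1).foldl (fun acc _ => acc ++ [(0 : Int)]) lst
  let lst := (PySem.List.pyRange 1 (count_aft + 1) 1).foldl (fun acc i => acc ++ [i]) lst
  lst

-- ===== PORT B =====
def get_position_embedding_given_ent_alt (ent_start : Int) (ent_end : Int) (text_length : Int) : List Int :=
  let nbef := max 0 ent_start
  let nmid := max 0 (ent_end - ent_start + 1)
  let naft := max 0 (text_length - ent_end - 1)
  (PySem.List.pyRange 0 (nbef + nmid + naft) 1).map (fun j =>
    if j < nbef then j - nbef
    else if j < nbef + nmid then 0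
    else j - nbef - nmid + 1)

-- ===== PRECONDITION & SPEC =====
def Spec_get_position_embedding_given_ent (ent_start : Int) (ent_end : Int) (text_length : Int) (out : List Int) : Prop := out = get_position_embedding_given_ent_alt ent_start ent_end text_length
instance (ent_start : Int) (ent_end : Int) (text_length : Int) (out : List Int) : Decidable (Spec_get_position_embedding_given_ent ent_start ent_end text_length out) := by unfold Spec_get_position_embedding_given_ent; infer_instance

-- ===== CLAIM (what is proved, stated in full; the proofs are below) =====
def Claim_equal_get_position_embedding_given_ent : Prop := ∀ (ent_start : Int) (ent_end : Int) (text_length : Int), Dom_get_position_embedding_given_ent ent_start ent_end text_length → Spec_get_position_embedding_given_ent ent_start ent_end text_length (get_position_embedding_given_ent ent_start ent_end text_length)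

-- ===== LEMMAS AND PROOFS =====

-- canonical form: the three segments written over List.range
def pvCanon (es ee tl : Int) : List Int :=
  (List.range es.toNat).map (fun k : Nat => (k : Int) - es)
    ++ List.replicate (ee - es + 1).toNat 0
    ++ (List.range (tl - ee - 1).toNat).map (fun k : Nat => (k : Int) + 1)

theorem pvA_canon (es ee tl : Int) :
    get_position_embedding_given_ent es ee tl = pvCanon es ee tl := by
  unfold get_position_embedding_given_ent pvCanon
  simp only [PySem.List.foldl_append_singleton_eq_map, List.nil_append]
  rw [PySem.List.pyRange_neg_one, PySem.List.pyRange_one, PySem.List.pyRange_one]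
  simp only [List.map_map, Function.comp_def, sub_zero, List.append_assoc]
  have e3 : (tl - ee - 1 + 1 - 1).toNat = (tl - ee - 1).toNat := by omega
  rw [e3]
  congr 1
  · exact List.map_congr_left (fun k _ => by ring)
  congr 1
  · rw [List.map_const']
    simp only [List.length_range]
  · exact List.map_congr_left (fun k _ => by ring)

theorem pvB_canon (es ee tl : Int) :
    get_position_embedding_given_ent_alt es ee tl = pvCanon es ee tl := by
  unfold get_position_embedding_given_ent_alt pvCanon
  dsimp only
  have h1 : (0 : Int) ≤ max 0 es := le_max_left _ _
  have h2 : max 0 es ≤ max 0 es + max 0 (ee - es + 1) :=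
    le_add_of_nonneg_right (le_max_left _ _)
  have h3 : max 0 es + max 0 (ee - es + 1)
      ≤ max 0 es + max 0 (ee - es + 1) + max 0 (tl - ee - 1) :=
    le_add_of_nonneg_right (le_max_left _ _)
  rw [PySem.List.pyRange_one_append 0 (max 0 es) _ h1 (le_trans h2 h3),
    PySem.List.pyRange_one_append (max 0 es) (max 0 es + max 0 (ee - es + 1)) _ h2 h3]
  simp only [List.map_append, List.append_assoc]
  rw [PySem.List.pyRange_one, PySem.List.pyRange_one, PySem.List.pyRange_one]
  simp only [List.map_map, Function.comp_def, sub_zero, zero_add, add_sub_cancel_left]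
  have e1 : (max 0 es).toNat = es.toNat := by omega
  have e2 : (max 0 (ee - es + 1)).toNat = (ee - es + 1).toNat := by omega
  have e3 : (max 0 (tl - ee - 1)).toNat = (tl - ee - 1).toNat := by omega
  rw [e1, e2, e3]
  congr 1
  · apply List.map_congr_left
    intro k hk
    simp only [List.mem_range] at hk
    split_ifs <;> omega
  congr 1
  · trans (List.map (fun _ : Nat => (0 : Int)) (List.range (ee - es + 1).toNat))
    · apply List.map_congr_left
      intro k hk
      simp only [List.mem_range] at hk
      split_ifs <;> omega
    · rw [List.map_const']
      simp only [List.length_range]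
  · apply List.map_congr_left
    intro k hk
    simp only [List.mem_range] at hk
    split_ifs <;> omega

-- ===== VERDICT (by name: the statement is the Claim_ definition above) =====
theorem get_position_embedding_given_ent_spec : Claim_equal_get_position_embedding_given_ent := by
  intro es ee tl _
  unfold Spec_get_position_embedding_given_ent
  rw [pvA_canon, pvB_canon]
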